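-- pv_equiv track=rewrite | github.com/arpan-svci/BCSE-III-CN-Assignments | Computer_networks_2/stop_and_arq/error.py | inject_error
-- ===== SOURCE A (Python) =====
-- def inject_error(str,pos):
--     l=list(str)
--     length=len(str)
--     for i in pos:
--         k=int(i%length)
--         if l[k]=='1':
--             l[k]='0'
--         else:
--             l[k]='1'
--     str=''.join(l)
--     return str
-- ===== SOURCE B (Python) =====
-- def inject_error(str, pos):
--     length = len(str)
--     counts = {}
--     for i in pos:
--         k = int(i % length)
--         counts[k] = counts.get(k, 0) + 1
--     out = []
--     for idx, c in enumerate(str):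
--         n = counts.get(idx)
--         if n is None:
--             out.append(c)
--         else:
--             bit = 1 if c == '1' else 0
--             out.append('1' if (bit + n) % 2 == 1 else '0')
--     return ''.join(out)
-- ===== Notes on version B (the rewrite author's own statement) =====
-- stated objective: alternative
-- what changed: B replaces A's per-position toggling of a mutable char list with a counting dict (position k -> number of hits) built in one pass over pos, then a single pass over the characters that writes each touched index's final bit from the parity of its count; it trades repeated in-place toggles for parity arithmetic.
import Mathlib
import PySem

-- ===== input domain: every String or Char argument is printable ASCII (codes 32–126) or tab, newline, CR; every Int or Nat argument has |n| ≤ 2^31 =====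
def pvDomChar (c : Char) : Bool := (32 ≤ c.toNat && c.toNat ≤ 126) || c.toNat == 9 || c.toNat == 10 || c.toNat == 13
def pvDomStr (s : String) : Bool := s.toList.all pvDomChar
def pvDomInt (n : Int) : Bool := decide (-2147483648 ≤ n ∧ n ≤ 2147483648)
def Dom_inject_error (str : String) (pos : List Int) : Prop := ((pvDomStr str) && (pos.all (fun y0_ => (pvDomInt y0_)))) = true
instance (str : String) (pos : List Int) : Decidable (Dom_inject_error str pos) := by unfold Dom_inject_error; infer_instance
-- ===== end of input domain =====

-- B replaces A's per-position in-place toggling with a count-then-parity two-pass scheme (alternative decomposition, same cost).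

-- ===== PORT A =====
-- A: l = list(str); for i in pos: k = i % len(str); toggle l[k]; return ''.join(l)
def inject_error (str : String) (pos : List Int) : String :=
  let l := str.toList
  let length : Int := (str.toList.length : Int)
  let l' := pos.foldl (fun l i =>
    let k := PySem.Int.mod i length
    -- l[k]: in range whenever length > 0 (Pre_ excludes the ZeroDivisionError case length = 0, pos ≠ [])
    if l.getD k.toNat ' ' = '1' then l.set k.toNat '0' else l.set k.toNat '1') l
  String.mk l'

-- ===== PORT B =====
-- B: counts[k] = counts.get(k,0)+1 over pos, then one pass over enumerate(str) using the parity of the count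
def inject_error_alt (str : String) (pos : List Int) : String :=
  let length : Int := (str.toList.length : Int)
  let counts : PySem.Dict Int Int :=
    pos.foldl (fun d i => d.modify (PySem.Int.mod i length) 0 (· + 1)) PySem.Dict.empty
  String.mk ((PySem.List.enumerate str.toList).map (fun p =>
    match counts.get? p.1 with
    | none => p.2
    | some n =>
        let bit : Int := if p.2 = '1' then 1 else 0
        if PySem.Int.mod (bit + n) 2 = 1 then '1' else '0'))

-- ===== PRECONDITION & SPEC =====
-- Pre_ excludes exactly the inputs where A raises ZeroDivisionError (empty string with a non-empty pos); B raises there too.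
def Pre_inject_error (str : String) (pos : List Int) : Prop := str.toList ≠ [] ∨ pos = []
instance (str : String) (pos : List Int) : Decidable (Pre_inject_error str pos) := by unfold Pre_inject_error; infer_instance
def pvWitness_inject_error : String × List Int := ("1011a", [0, -3, 7, 7])

def Spec_inject_error (str : String) (pos : List Int) (out : String) : Prop := out = inject_error_alt str pos
instance (str : String) (pos : List Int) (out : String) : Decidable (Spec_inject_error str pos out) := by unfold Spec_inject_error; infer_instance

-- ===== CLAIM (what is proved, stated in full; the proofs are below) =====
def Claim_equal_inject_error : Prop := ∀ (str : String) (pos : List Int), Dom_inject_error str pos → Pre_inject_error str pos → Spec_inject_error str pos (inject_error str pos)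

-- ===== LEMMAS AND PROOFS =====

-- final value of a character hit n times, starting from c
def pvApply (n : Nat) (c : Char) : Char :=
  if n = 0 then c else if ((if c = '1' then 1 else 0) + n) % 2 = 1 then '1' else '0'

def pvStep (length : Int) (l : List Char) (i : Int) : List Char :=
  let k := PySem.Int.mod i length
  if l.getD k.toNat ' ' = '1' then l.set k.toNat '0' else l.set k.toNat '1'

theorem pvStep_length (length : Int) (l : List Char) (i : Int) :
    (pvStep length l i).length = l.length := by
  simp only [pvStep]
  split <;> simp

theorem pvApply_toggle (n : Nat) (c : Char) :
    pvApply n (if c = '1' then '0' else '1') = pvApply (n + 1) c := by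
  by_cases hc : c = '1' <;>
    rcases Nat.even_or_odd n with ⟨m, hm⟩ | ⟨m, hm⟩ <;> subst hm <;>
    simp only [pvApply, hc, if_true, if_false, reduceCtorEq] <;>
    split_ifs <;> simp_all <;> omega

theorem pvStep_get (length : Int) (hlen : 0 < length) (l : List Char)
    (hl : (l.length : Int) = length) (i : Int) (j : Nat) (hj : j < l.length) :
    (pvStep length l i)[j]'(by rw [pvStep_length]; exact hj) =
      (if j = (PySem.Int.mod i length).toNat then (if l[j] = '1' then '0' else '1') else l[j]) := by
  have hk0 : 0 ≤ PySem.Int.mod i length := PySem.Int.mod_nonneg i hlen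
  have hklt : PySem.Int.mod i length < length := PySem.Int.mod_lt i hlen
  have hkn : (PySem.Int.mod i length).toNat < l.length := by omega
  have hget : l.getD (PySem.Int.mod i length).toNat ' ' = l[(PySem.Int.mod i length).toNat] :=
    List.getD_eq_getElem l ' ' hkn
  by_cases he : j = (PySem.Int.mod i length).toNat
  · subst he
    by_cases h1 : l[(PySem.Int.mod i length).toNat] = '1' <;>
      simp [pvStep, List.getElem?_eq_getElem hkn, h1]
  · have hne2 : (PySem.Int.mod i length).toNat ≠ j := Ne.symm he
    simp only [pvStep]
    split <;> simp [List.getElem_set, hne2]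

theorem pv_fold_get (pos : List Int) (length : Int) (hlen : 0 < length) :
    ∀ (l : List Char), (l.length : Int) = length → ∀ (j : Nat) (hj : j < l.length),
      (pos.foldl (pvStep length) l)[j]? =
        some (pvApply ((pos.map (fun i => PySem.Int.mod i length)).count (j : Int)) (l[j]'hj)) := by
  induction pos with
  | nil =>
    intro l hl j hj
    simp [List.getElem?_eq_getElem hj, pvApply]
  | cons i rest ih =>
    intro l hl j hj
    have hk0 : 0 ≤ PySem.Int.mod i length := PySem.Int.mod_nonneg i hlen
    have hj2 : j < (pvStep length l i).length := by rw [pvStep_length]; exact hj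
    have hl2 : ((pvStep length l i).length : Int) = length := by rw [pvStep_length]; exact hl
    have hih := ih (pvStep length l i) hl2 j hj2
    simp only [List.foldl_cons]
    rw [hih]
    rw [pvStep_get length hlen l hl i j hj]
    by_cases he : j = (PySem.Int.mod i length).toNat
    · have hkj : PySem.Int.mod i length = (j : Int) := by omega
      have hcnt : ((i :: rest).map (fun i' => PySem.Int.mod i' length)).count (j : Int) =
          (rest.map (fun i' => PySem.Int.mod i' length)).count (j : Int) + 1 := by
        simp [hkj]
      rw [if_pos he, pvApply_toggle, hcnt]
    · have hkj : ¬ (PySem.Int.mod i length = (j : Int)) := by omega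
      have hcnt : ((i :: rest).map (fun i' => PySem.Int.mod i' length)).count (j : Int) =
          (rest.map (fun i' => PySem.Int.mod i' length)).count (j : Int) := by
        simp [hkj]
      rw [if_neg he, hcnt]

theorem pv_counts_get? (pos : List Int) (length : Int) (v : Int) :
    (pos.foldl (fun d i => d.modify (PySem.Int.mod i length) 0 (· + 1)) PySem.Dict.empty).get? v =
      (if ((pos.map (fun i => PySem.Int.mod i length)).count v) = 0 then none
       else some (((pos.map (fun i => PySem.Int.mod i length)).count v : Int))) := by
  have hfold : pos.foldl (fun d i => d.modify (PySem.Int.mod i length) 0 (· + 1)) PySem.Dict.empty =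
      PySem.Dict.counter (pos.map (fun i => PySem.Int.mod i length)) := by
    rw [PySem.Dict.counter_eq_foldl, List.foldl_map]
  rw [hfold]
  set xs := pos.map (fun i => PySem.Int.mod i length) with hxs
  by_cases hmem : v ∈ xs
  · have hcount : xs.count v ≠ 0 := by
      have := List.count_pos_iff.mpr hmem
      omega
    have hcontains : (PySem.Dict.counter xs).get? v ≠ none := by
      intro h
      rw [PySem.Dict.get?_eq_none_iff_not_mem_keys] at h
      exact h (by simp [PySem.Dict.keys_counter, PySem.Set.mem_ofList, hmem])
    obtain ⟨n, hn⟩ := Option.ne_none_iff_exists'.mp hcontains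
    have hgd := PySem.Dict.getD_counter (xs := xs) (v := v)
    rw [PySem.Dict.getD_eq_get?_getD, hn] at hgd
    simp only [Option.getD_some] at hgd
    rw [hn, hgd]
    simp [hcount]
  · have hcount : xs.count v = 0 := List.count_eq_zero.mpr hmem
    have hnone : (PySem.Dict.counter xs).get? v = none := by
      rw [PySem.Dict.get?_eq_none_iff_not_mem_keys]
      simp [PySem.Dict.keys_counter, PySem.Set.mem_ofList, hmem]
    simp [hnone, hcount]

theorem pv_alt_cell (pos : List Int) (length : Int) (c : Char) (j : Nat) :
    (match (pos.foldl (fun d i => d.modify (PySem.Int.mod i length) 0 (· + 1)) PySem.Dict.empty).get? ((j : Int)) with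
     | none => c
     | some n =>
         let bit : Int := if c = '1' then 1 else 0
         if PySem.Int.mod (bit + n) 2 = 1 then '1' else '0') =
    pvApply ((pos.map (fun i => PySem.Int.mod i length)).count (j : Int)) c := by
  rw [pv_counts_get?]
  set m := (pos.map (fun i => PySem.Int.mod i length)).count (j : Int) with hm
  by_cases h0 : m = 0
  · simp [h0, pvApply]
  · have hmod : ∀ a : Int, PySem.Int.mod a 2 = a % 2 := fun a =>
      PySem.Int.mod_eq_emod_of_pos (a := a) (by norm_num)
    simp only [h0, if_false, hmod]
    by_cases hc : c = '1' <;>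
      rcases Nat.even_or_odd m with ⟨t, ht⟩ | ⟨t, ht⟩ <;>
      · simp only [hc, pvApply, if_true, if_false, h0]
        split_ifs <;> simp_all <;> omega

theorem inject_error_eq (str : String) (pos : List Int) (hpre : Pre_inject_error str pos) :
    inject_error str pos = inject_error_alt str pos := by
  dsimp only [inject_error, inject_error_alt]
  rcases hpre with hne | hnil
  · congr 1
    set L := str.toList with hL
    set length : Int := (L.length : Int) with hlen
    have hpos : 0 < length := by
      rw [hlen]
      exact_mod_cast List.length_pos_iff.mpr hne
    show pos.foldl (pvStep length) L = _
    have hlenA : ∀ (ps : List Int) (l : List Char),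
        (ps.foldl (pvStep length) l).length = l.length := by
      intro ps
      induction ps with
      | nil => intro l; rfl
      | cons i rest ih =>
          intro l
          simp only [List.foldl_cons]
          rw [ih (pvStep length l i), pvStep_length]
    apply List.ext_getElem?
    intro j
    by_cases hj : j < L.length
    · rw [pv_fold_get pos length hpos L hlen.symm j hj]
      rw [List.getElem?_map, PySem.List.getElem?_enumerate,
          List.getElem?_eq_getElem hj]
      simp only [Option.map_some]
      have hcell := pv_alt_cell pos length (L[j]'hj) j
      simp only [Int.zero_add] at hcell ⊢
      rw [← hcell]
    · have hA : (pos.foldl (pvStep length) L)[j]? = none := by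
        rw [List.getElem?_eq_none_iff, hlenA]
        omega
      rw [hA]
      symm
      rw [List.getElem?_eq_none_iff]
      simp only [List.length_map, PySem.List.length_enumerate]
      omega
  · subst hnil
    simp only [List.foldl_nil, PySem.Dict.get?_empty]
    congr 1
    simp [PySem.List.map_snd_enumerate]

-- ===== VERDICT (by name: the statement is the Claim_ definition above) =====
theorem inject_error_spec : Claim_equal_inject_error := by
  intro str pos _ hpre
  unfold Spec_inject_error
  exact inject_error_eq str pos hpre
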